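-- pv_equiv track=rewrite | github.com/ShubhamOjha/codechef-solutions | pratice/coins.py | denomination
-- ===== SOURCE A (Python) =====
-- memo = {}
--
-- def denomination(coin):
--     if coin <=2:
--         return coin
--     if coin in memo:
--         return memo[coin]
--     else:
--         memo[coin] = max(coin, denomination(coin//2)+denomination(coin//3)+denomination(coin//4))
--     return memo[coin]
-- ===== SOURCE B (Python) =====
-- def denomination(coin):
--     # Bottom-up DP: collect the reachable sub-coin values, then fill a table in
--     # increasing order, instead of top-down memoized recursion with a global memo.
--     if coin <= 2:
--         return coin
--     seen = set()
--
--     def collect(v):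
--         if v <= 2 or v in seen:
--             return
--         seen.add(v)
--         collect(v // 2)
--         collect(v // 3)
--         collect(v // 4)
--
--     collect(coin)
--     memo = {}
--     for v in sorted(seen):
--         memo[v] = max(v, sum(memo.get(c, c) for c in (v // 2, v // 3, v // 4)))
--     return memo[coin]
-- ===== Notes on version B (the rewrite author's own statement) =====
-- stated objective: alternative
-- what changed: Replaces A's top-down recursion with a process-global memo dict by an explicit two-phase algorithm: collect the set of reachable sub-coin values, then fill a local table bottom-up over the values in increasing order.
import Mathlib
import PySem

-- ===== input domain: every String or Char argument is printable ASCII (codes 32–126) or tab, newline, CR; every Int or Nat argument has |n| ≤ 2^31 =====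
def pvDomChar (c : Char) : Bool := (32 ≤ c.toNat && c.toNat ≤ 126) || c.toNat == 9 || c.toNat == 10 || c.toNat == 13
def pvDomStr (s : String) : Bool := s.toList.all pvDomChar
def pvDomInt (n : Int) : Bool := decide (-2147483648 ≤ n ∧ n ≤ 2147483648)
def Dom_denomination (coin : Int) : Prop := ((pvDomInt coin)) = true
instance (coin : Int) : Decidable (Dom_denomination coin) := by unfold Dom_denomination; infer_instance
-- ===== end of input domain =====

-- B replaces A's top-down recursion with a global memo dict by an explicit
-- reachable-value collection followed by a bottom-up DP in increasing order
-- (objective: alternative; return values proved equal. A also mutates a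
-- module-level memo dict across calls; the equivalence is about the return
-- value only, which does not depend on that cache.)
-- Both recursive ports carry a Nat fuel (coin.toNat + 1, always sufficient:
-- the sub-coin strictly shrinks each level) purely to make the same
-- computation total; the fuel-exhausted branches are proved unreachable.

-- ===== PORT A =====
-- A's module-level memo, threaded explicitly as state (Python mutates a global
-- dict; recursive calls see entries added by earlier calls, left to right).
-- Since the cached values are exactly this pure function's own values, the
-- cache never changes a return value, and the port starts from the empty memo.
def denominationMemo : Nat → Int → PySem.Dict Int Int → Int × PySem.Dict Int Int
  | 0, coin, memo => (coin, memo)  -- unreachable: fuel exceeds the recursion depth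
  | fuel + 1, coin, memo =>
    if coin ≤ 2 then (coin, memo)
    else
      match memo.get? coin with
      | some x => (x, memo)
      | none =>
        let r2 := denominationMemo fuel (PySem.Int.floordiv coin 2) memo
        let r3 := denominationMemo fuel (PySem.Int.floordiv coin 3) r2.2
        let r4 := denominationMemo fuel (PySem.Int.floordiv coin 4) r3.2
        let val := max coin (r2.1 + r3.1 + r4.1)
        (val, r4.2.insert coin val)

def denomination (coin : Int) : Int :=
  (denominationMemo (coin.toNat + 1) coin PySem.Dict.empty).1

-- ===== PORT B =====
-- collect(v): add every reachable value > 2 to seen (nesting = Python's call order)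
def pvCollect : Nat → Int → PySem.Set Int → PySem.Set Int
  | 0, _, seen => seen  -- unreachable: fuel exceeds the recursion depth
  | fuel + 1, v, seen =>
    if v ≤ 2 ∨ PySem.Set.contains seen v then seen
    else
      pvCollect fuel (PySem.Int.floordiv v 4)
        (pvCollect fuel (PySem.Int.floordiv v 3)
          (pvCollect fuel (PySem.Int.floordiv v 2) (PySem.Set.add seen v)))

-- loop body: memo[v] = max(v, sum(memo.get(c, c) for c in (v//2, v//3, v//4)))
def pvDpStep (memo : PySem.Dict Int Int) (v : Int) : PySem.Dict Int Int :=
  memo.insert v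
    (max v (memo.getD (PySem.Int.floordiv v 2) (PySem.Int.floordiv v 2) +
            memo.getD (PySem.Int.floordiv v 3) (PySem.Int.floordiv v 3) +
            memo.getD (PySem.Int.floordiv v 4) (PySem.Int.floordiv v 4)))

def denomination_alt (coin : Int) : Int :=
  if coin ≤ 2 then coin
  else
    let seen := pvCollect (coin.toNat + 1) coin PySem.Set.empty
    let memo := (PySem.List.sorted seen (fun x => x) false).foldl pvDpStep PySem.Dict.empty
    -- memo[coin]; coin is always a key here (proved below), so Python's
    -- KeyError branch is unreachable and the default is never used
    (memo.get? coin).getD 0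

-- ===== PRECONDITION & SPEC =====
def Spec_denomination (coin : Int) (out : Int) : Prop := out = denomination_alt coin
instance (coin : Int) (out : Int) : Decidable (Spec_denomination coin out) := by unfold Spec_denomination; infer_instance

-- ===== CLAIM (what is proved, stated in full; the proofs are below) =====
def Claim_equal_denomination : Prop := ∀ (coin : Int), Dom_denomination coin → Spec_denomination coin (denomination coin)

-- ===== LEMMAS AND PROOFS =====

-- the sub-coins v//2, v//3, v//4 strictly shrink (fuel sufficiency)
theorem pvFdLt (v k : Int) (hv : 2 < v) (hk : 1 < k) :
    (PySem.Int.floordiv v k).toNat < v.toNat := by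
  have hb : (0:Int) < k := by omega
  have h1 : PySem.Int.floordiv v k < v :=
    (PySem.Int.floordiv_lt_iff_lt_mul hb).2 (by nlinarith)
  have h2 : (0:Int) ≤ PySem.Int.floordiv v k :=
    (PySem.Int.le_floordiv_iff_mul_le hb).2 (by nlinarith)
  omega

-- the pure recursion A's memo caches (proof helper)
def pvDenom (coin : Int) : Int :=
  if coin ≤ 2 then coin
  else
    max coin (pvDenom (PySem.Int.floordiv coin 2) +
              pvDenom (PySem.Int.floordiv coin 3) +
              pvDenom (PySem.Int.floordiv coin 4))
termination_by coin.toNat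
decreasing_by
  · exact pvFdLt coin 2 (by omega) (by norm_num)
  · exact pvFdLt coin 3 (by omega) (by norm_num)
  · exact pvFdLt coin 4 (by omega) (by norm_num)

theorem pvDenomBase (c : Int) (hc : c ≤ 2) : pvDenom c = c := by
  rw [pvDenom, if_pos hc]

theorem pvDenomStep (v : Int) (hv : 2 < v) :
    pvDenom v =
      max v (pvDenom (PySem.Int.floordiv v 2) +
             pvDenom (PySem.Int.floordiv v 3) +
             pvDenom (PySem.Int.floordiv v 4)) := by
  rw [pvDenom, if_neg (by omega)]

-- the memoized port computes the pure recursion, preserving the memo invariant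
theorem pvMemoCorrect (fuel : Nat) :
    ∀ (v : Int) (memo : PySem.Dict Int Int), v.toNat < fuel →
    (∀ k x : Int, memo.get? k = some x → x = pvDenom k) →
    (denominationMemo fuel v memo).1 = pvDenom v ∧
    (∀ k x : Int, (denominationMemo fuel v memo).2.get? k = some x → x = pvDenom k) := by
  induction fuel with
  | zero => intro v memo hf; omega
  | succ n ih =>
      intro v memo hf hm
      by_cases hv : v ≤ 2
      · rw [denominationMemo, if_pos hv]
        exact ⟨(pvDenomBase v hv).symm, hm⟩
      · push_neg at hv
        rw [denominationMemo, if_neg (by omega)]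
        rcases hx : memo.get? v with _ | x
        · simp only []
          have hfd : ∀ k : Int, (k = 2 ∨ k = 3 ∨ k = 4) →
              (PySem.Int.floordiv v k).toNat < n := by
            rintro k (rfl | rfl | rfl)
            · exact lt_of_lt_of_le (pvFdLt v 2 hv (by norm_num)) (by omega)
            · exact lt_of_lt_of_le (pvFdLt v 3 hv (by norm_num)) (by omega)
            · exact lt_of_lt_of_le (pvFdLt v 4 hv (by norm_num)) (by omega)
          rcases ih _ memo (hfd 2 (by tauto)) hm with ⟨e2, m2⟩
          rcases ih _ _ (hfd 3 (by tauto)) m2 with ⟨e3, m3⟩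
          rcases ih _ _ (hfd 4 (by tauto)) m3 with ⟨e4, m4⟩
          constructor
          · rw [e2, e3, e4, ← pvDenomStep v (by omega)]
          · intro k x hk
            rw [PySem.Dict.get?_insert] at hk
            split_ifs at hk with hkv
            · subst hkv
              have := Option.some.inj hk
              rw [← this, e2, e3, e4, ← pvDenomStep k (by omega)]
            · exact m4 k x hk
        · simp only []
          exact ⟨hm v x hx, hm⟩

theorem pvCollect_subset (fuel : Nat) :
    ∀ (v : Int) (seen : PySem.Set Int), ∀ x ∈ seen, x ∈ pvCollect fuel v seen := by
  induction fuel with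
  | zero => intro v seen x hx; exact hx
  | succ n ih =>
      intro v seen x hx
      rw [pvCollect]
      split
      · exact hx
      · exact ih _ _ _ (ih _ _ _ (ih _ _ _ ((PySem.Set.mem_add _ _ _).2 (Or.inl hx))))

theorem pvCollect_mem_self (fuel : Nat) (v : Int) (seen : PySem.Set Int)
    (hv : 2 < v) (hf : v.toNat < fuel) : v ∈ pvCollect fuel v seen := by
  rcases fuel with _ | n
  · omega
  · by_cases hc : PySem.Set.contains seen v
    · rw [pvCollect]
      rw [if_pos (Or.inr hc)]
      exact (PySem.Set.contains_iff _ _).1 hc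
    · rw [pvCollect]
      rw [if_neg (by push_neg; exact ⟨by omega, hc⟩)]
      exact pvCollect_subset _ _ _ _ (pvCollect_subset _ _ _ _
        (pvCollect_subset _ _ _ _ ((PySem.Set.mem_add _ _ _).2 (Or.inr rfl))))

-- every NEW element of the collected set is > 2 and (children-)closed
theorem pvCollect_closed (fuel : Nat) :
    ∀ (v : Int) (seen : PySem.Set Int), v.toNat < fuel →
    ∀ w ∈ pvCollect fuel v seen, w ∉ seen →
      2 < w ∧ ∀ k : Int, (k = 2 ∨ k = 3 ∨ k = 4) → 2 < PySem.Int.floordiv w k →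
        PySem.Int.floordiv w k ∈ pvCollect fuel v seen := by
  induction fuel with
  | zero => intro v seen hf; omega
  | succ n ih =>
      intro v seen hf w hw hnw
      by_cases h : v ≤ 2 ∨ PySem.Set.contains seen v
      · rw [pvCollect, if_pos h] at hw
        exact absurd hw hnw
      · have hv : 2 < v := by push_neg at h; omega
        have hfd : ∀ k : Int, (k = 2 ∨ k = 3 ∨ k = 4) →
            (PySem.Int.floordiv v k).toNat < n := by
          rintro k (rfl | rfl | rfl)
          · exact lt_of_lt_of_le (pvFdLt v 2 hv (by norm_num)) (by omega)
          · exact lt_of_lt_of_le (pvFdLt v 3 hv (by norm_num)) (by omega)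
          · exact lt_of_lt_of_le (pvFdLt v 4 hv (by norm_num)) (by omega)
        rw [pvCollect, if_neg h] at hw ⊢
        set s1 := PySem.Set.add seen v with hs1
        set s2 := pvCollect n (PySem.Int.floordiv v 2) s1 with hs2
        set s3 := pvCollect n (PySem.Int.floordiv v 3) s2 with hs3
        by_cases h3 : w ∈ s3
        · by_cases h2 : w ∈ s2
          · by_cases h1 : w ∈ s1
            · -- w = v, freshly added
              have hwv : w = v := by
                rcases (PySem.Set.mem_add _ _ _).1 h1 with h' | h'
                · exact absurd h' hnw
                · exact h'
              subst hwv
              refine ⟨hv, ?_⟩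
              rintro k (rfl | rfl | rfl) hk
              · exact pvCollect_subset _ _ _ _ (pvCollect_subset _ _ _ _
                  (pvCollect_mem_self n _ _ hk (hfd 2 (by tauto))))
              · exact pvCollect_subset _ _ _ _
                  (pvCollect_mem_self n _ _ hk (hfd 3 (by tauto)))
              · exact pvCollect_mem_self n _ _ hk (hfd 4 (by tauto))
            · rcases ih _ _ (hfd 2 (by tauto)) w h2 h1 with ⟨hgt, hcl⟩
              exact ⟨hgt, fun k hk hk2 => pvCollect_subset _ _ _ _
                (pvCollect_subset _ _ _ _ (hcl k hk hk2))⟩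
          · rcases ih _ _ (hfd 3 (by tauto)) w h3 h2 with ⟨hgt, hcl⟩
            exact ⟨hgt, fun k hk hk2 => pvCollect_subset _ _ _ _ (hcl k hk hk2)⟩
        · exact ih _ _ (hfd 4 (by tauto)) w hw h3

theorem pvCollect_nodup (fuel : Nat) :
    ∀ (v : Int) (seen : PySem.Set Int), seen.Nodup → (pvCollect fuel v seen).Nodup := by
  induction fuel with
  | zero => intro v seen hn; exact hn
  | succ n ih =>
      intro v seen hn
      rw [pvCollect]
      split
      · exact hn
      · exact ih _ _ (ih _ _ (ih _ _ (PySem.Set.nodup_add _ _ hn)))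

-- main fold invariant: values in memo are A's values, and all of S ends up in memo
theorem pvDpFold (S : List Int)
    (hS : ∀ w ∈ S, ∀ k : Int, (k = 2 ∨ k = 3 ∨ k = 4) →
      2 < PySem.Int.floordiv w k → PySem.Int.floordiv w k ∈ S) :
    ∀ (l : List Int) (memo : PySem.Dict Int Int),
      l.Pairwise (· < ·) →
      (∀ w ∈ l, w ∈ S ∧ 2 < w) →
      (∀ k : Int, memo.contains k = true → 2 < k) →
      (∀ k x, memo.get? k = some x → x = pvDenom k) →
      (∀ w ∈ S, 2 < w → memo.contains w = true ∨ w ∈ l) →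
      (∀ k x, (l.foldl pvDpStep memo).get? k = some x → x = pvDenom k) ∧
      (∀ w ∈ S, 2 < w → (l.foldl pvDpStep memo).contains w = true) := by
  intro l
  induction l with
  | nil =>
      intro memo _ _ _ hval hcov
      refine ⟨hval, fun w hw h2 => ?_⟩
      rcases hcov w hw h2 with h | h
      · exact h
      · simp at h
  | cons v rest ih =>
      intro memo hpw hmem hpos hval hcov
      have hv2 : 2 < v := (hmem v (by simp)).2
      have hvS : v ∈ S := (hmem v (by simp)).1
      have hrest_gt : ∀ w ∈ rest, v < w := (List.pairwise_cons.1 hpw).1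
      -- each child lookup returns the pure recursion's value
      have hchild : ∀ k : Int, (k = 2 ∨ k = 3 ∨ k = 4) →
          memo.getD (PySem.Int.floordiv v k) (PySem.Int.floordiv v k) =
            pvDenom (PySem.Int.floordiv v k) := by
        intro k hk
        have hclt : (PySem.Int.floordiv v k).toNat < v.toNat := by
          rcases hk with rfl | rfl | rfl
          · exact pvFdLt v 2 hv2 (by norm_num)
          · exact pvFdLt v 3 hv2 (by norm_num)
          · exact pvFdLt v 4 hv2 (by norm_num)
        set c := PySem.Int.floordiv v k with hc
        have hcv : c < v := by omega
        by_cases h2c : 2 < c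
        · have hcS : c ∈ S := hS v hvS k hk h2c
          have : memo.contains c = true ∨ c ∈ v :: rest := hcov c hcS h2c
          have hcont : memo.contains c = true := by
            rcases this with h | h
            · exact h
            · rw [List.mem_cons] at h
              rcases h with h | h
              · omega
              · exact absurd (hrest_gt c h) (by omega)
          rcases Option.isSome_iff_exists.1
              (show (memo.get? c).isSome by
                rw [← PySem.Dict.contains_eq_isSome_get? memo c]; exact hcont) with ⟨x, hx⟩
          rw [PySem.Dict.getD_eq_get?_getD, hx, Option.getD_some]
          exact hval c x hx
        · have hnc : memo.contains c = false := by
            by_contra hcc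
            have := hpos c (by simpa using hcc)
            omega
          rw [PySem.Dict.getD_of_not_contains _ _ hnc, pvDenomBase c (by omega)]
      apply ih (pvDpStep memo v)
      · exact (List.pairwise_cons.1 hpw).2
      · exact fun w hw => hmem w (by simp [hw])
      · -- keys of memo' are still > 2
        intro k hk
        unfold pvDpStep at hk
        rw [PySem.Dict.contains_insert] at hk
        rcases Bool.or_eq_true_iff.1 hk with h | h
        · have : k = v := by simpa using h
          omega
        · exact hpos k h
      · -- values of memo' are the pure recursion's values
        intro k x hx
        unfold pvDpStep at hx
        by_cases hkv : k = v
        · subst hkv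
          rw [PySem.Dict.get?_insert_self] at hx
          have hxe := Option.some.inj hx
          rw [← hxe, hchild 2 (by tauto), hchild 3 (by tauto), hchild 4 (by tauto),
            ← pvDenomStep k hv2]
        · rw [PySem.Dict.get?_insert, if_neg hkv] at hx
          exact hval k x hx
      · -- coverage
        intro w hw h2w
        rcases hcov w hw h2w with h | h
        · left; unfold pvDpStep
          rw [PySem.Dict.contains_insert, h, Bool.or_true]
        · rw [List.mem_cons] at h
          rcases h with h | h
          · left; unfold pvDpStep; rw [h]; exact PySem.Dict.contains_insert_self _ _ _
          · right; exact h

-- ===== VERDICT (by name: the statement is the Claim_ definition above) =====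
theorem denomination_spec : Claim_equal_denomination := by
  unfold Claim_equal_denomination Spec_denomination
  intro coin _
  have hA : denomination coin = pvDenom coin := by
    rw [denomination]
    exact (pvMemoCorrect (coin.toNat + 1) coin PySem.Dict.empty (by omega)
      (by intro k x hx; rw [PySem.Dict.get?_empty] at hx; exact absurd hx (by simp))).1
  rw [hA]
  by_cases hc : coin ≤ 2
  · rw [denomination_alt, if_pos hc, pvDenomBase coin hc]
  · push_neg at hc
    rw [denomination_alt, if_neg (by omega)]
    set S := pvCollect (coin.toNat + 1) coin PySem.Set.empty with hSdef
    set L := PySem.List.sorted S (fun x => x) false with hLdef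
    have hSclosed : ∀ w ∈ S, ∀ k : Int, (k = 2 ∨ k = 3 ∨ k = 4) →
        2 < PySem.Int.floordiv w k → PySem.Int.floordiv w k ∈ S := by
      intro w hw k hk h2
      exact (pvCollect_closed (coin.toNat + 1) coin PySem.Set.empty (by omega)
        w hw (by simp [PySem.Set.empty])).2 k hk h2
    have hSgt : ∀ w ∈ S, 2 < w := fun w hw =>
      (pvCollect_closed (coin.toNat + 1) coin PySem.Set.empty (by omega)
        w hw (by simp [PySem.Set.empty])).1
    have hSnodup : S.Nodup := pvCollect_nodup _ _ _ (by simp [PySem.Set.empty])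
    have hperm : L.Perm S := PySem.List.sorted_perm _ _ _
    have hLmem : ∀ w, w ∈ L ↔ w ∈ S := fun w => hperm.mem_iff
    have hLnodup : L.Nodup := hperm.nodup_iff.2 hSnodup
    have hLle : L.Pairwise (fun a b => (a : Int) ≤ b) := by
      simpa using PySem.List.sorted_pairwise (xs := S) (key := fun x => x)
    have hLlt : L.Pairwise (· < ·) := by
      have hne : L.Pairwise (· ≠ ·) := hLnodup
      have := hLle.and hne
      exact this.imp (by rintro a b ⟨h1, h2⟩; omega)
    have he1 : ∀ k : Int, (PySem.Dict.empty : PySem.Dict Int Int).contains k = true → 2 < k := by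
      intro k hk; rw [PySem.Dict.contains_empty] at hk; exact absurd hk (by simp)
    have he2 : ∀ k x : Int, (PySem.Dict.empty : PySem.Dict Int Int).get? k = some x → x = pvDenom k := by
      intro k x hx; rw [PySem.Dict.get?_empty] at hx; exact absurd hx (by simp)
    have hmain := pvDpFold S hSclosed L PySem.Dict.empty hLlt
      (fun w hw => ⟨(hLmem w).1 hw, hSgt w ((hLmem w).1 hw)⟩)
      he1 he2
      (fun w hw h2 => Or.inr ((hLmem w).2 hw))
    have hcoinS : coin ∈ S := pvCollect_mem_self _ _ _ hc (by omega)
    have hcont := hmain.2 coin hcoinS hc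
    rcases Option.isSome_iff_exists.1
        (show ((List.foldl pvDpStep PySem.Dict.empty L).get? coin).isSome by
          rw [← PySem.Dict.contains_eq_isSome_get? _ coin]; exact hcont) with ⟨x, hx⟩
    show pvDenom coin = ((List.foldl pvDpStep PySem.Dict.empty L).get? coin).getD 0
    rw [hx, Option.getD_some, hmain.1 coin x hx]
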